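-- pv_equiv track=rewrite | github.com/kentxchang-goedutw/youtube_sub_tools | youtube_subtitle_tool.py | choose_format_url
-- ===== SOURCE A (Python) =====
-- from typing import Any, Callable, Dict, List, Optional, Tuple
--
-- def choose_format_url(track: Dict[str, Any], target_format: str) -> Tuple[str, str]:
--     """
--     找出指定格式字幕下載網址。
--
--     Args:
--         track: 字幕軌道。
--         target_format: 目標格式。
--
--     Returns:
--         實際格式與下載網址。
--
--     Raises:
--         ValueError: 找不到可下載網址。
--     """
--     raw_formats = track.get("raw_formats") or []
--
--     for item in raw_formats:
--         ext = str(item.get("ext") or "").strip()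
--         url = str(item.get("url") or "").strip()
--
--         if ext == target_format and url:
--             return ext, url
--
--     for item in raw_formats:
--         ext = str(item.get("ext") or "").strip()
--         url = str(item.get("url") or "").strip()
--
--         if url:
--             return ext or target_format, url
--
--     raise ValueError("找不到可下載的字幕網址。")
-- ===== SOURCE B (Python) =====
-- def choose_format_url(track, target_format):
--     """Single fused pass: return exact match immediately, else first non-empty-url fallback."""
--     fallback = None
--     for item in (track.get("raw_formats") or []):
--         ext = str(item.get("ext") or "").strip()
--         url = str(item.get("url") or "").strip()
--         if not url:
--             continue
--         if ext == target_format: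
--             return ext, url
--         if fallback is None:
--             fallback = (ext or target_format, url)
--     if fallback is not None:
--         return fallback
--     raise ValueError("找不到可下載的字幕網址。")
-- ===== Notes on version B (the rewrite author's own statement) =====
-- stated objective: simpler
-- what changed: Fuses A's two sequential passes over raw_formats into one pass that returns an exact-format match immediately and otherwise keeps the first non-empty-url item as a fallback accumulator.
import Mathlib
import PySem

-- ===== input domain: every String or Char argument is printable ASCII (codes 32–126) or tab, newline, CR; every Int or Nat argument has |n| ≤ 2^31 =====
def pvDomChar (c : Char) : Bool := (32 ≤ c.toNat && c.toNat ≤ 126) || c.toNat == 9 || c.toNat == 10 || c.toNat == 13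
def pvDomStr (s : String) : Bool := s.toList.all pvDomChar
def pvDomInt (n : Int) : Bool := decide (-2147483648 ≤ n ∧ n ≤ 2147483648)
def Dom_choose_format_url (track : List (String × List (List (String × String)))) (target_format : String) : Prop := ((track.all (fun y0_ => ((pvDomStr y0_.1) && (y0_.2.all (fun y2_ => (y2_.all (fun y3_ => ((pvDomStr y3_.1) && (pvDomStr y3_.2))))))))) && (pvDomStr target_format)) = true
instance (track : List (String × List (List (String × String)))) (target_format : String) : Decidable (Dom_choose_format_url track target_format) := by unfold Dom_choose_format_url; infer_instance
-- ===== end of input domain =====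

-- B fuses A's two sequential passes into one accumulator-carrying pass (objective: simpler); return-value equivalence only.

-- ===== PORT A =====
-- ext = str(item.get("ext") or "").strip(); url likewise (values are strings, str() is identity; 'or ""' = getD "")
def pvField (item : List (String × String)) (key : String) : String :=
  PySem.Str.strip (PySem.Dict.getD (PySem.Dict.mk item) key "")

-- first loop of A: first item with ext == target_format and non-empty url
def pvFindExact (raw : List (List (String × String))) (target_format : String) : Option (String × String) :=
  match raw with
  | [] => none
  | item :: rest =>
      let ext := pvField item "ext"
      let url := pvField item "url"
      if ext = target_format ∧ url ≠ "" then some (ext, url) else pvFindExact rest target_format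

-- second loop of A: first item with non-empty url, returning (ext or target_format, url)
def pvFindAny (raw : List (List (String × String))) (target_format : String) : Option (String × String) :=
  match raw with
  | [] => none
  | item :: rest =>
      let ext := pvField item "ext"
      let url := pvField item "url"
      if url ≠ "" then some ((if ext = "" then target_format else ext), url) else pvFindAny rest target_format

def choose_format_url (track : List (String × List (List (String × String)))) (target_format : String) : String × String :=
  let raw := PySem.Dict.getD (PySem.Dict.mk track) "raw_formats" []
  match pvFindExact raw target_format with
  | some p => p
  | none =>
      match pvFindAny raw target_format with
      | some p => p
      | none => ("", "")   -- Python raises ValueError here; excluded by Pre_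

-- ===== PORT B =====
-- B's single loop with a first-fallback accumulator
def pvAltLoop (raw : List (List (String × String))) (target_format : String) (fallback : Option (String × String)) : String × String :=
  match raw with
  | [] =>
      match fallback with
      | some p => p
      | none => ("", "")   -- Python raises ValueError here; excluded by Pre_
  | item :: rest =>
      let ext := pvField item "ext"
      let url := pvField item "url"
      if url = "" then pvAltLoop rest target_format fallback
      else if ext = target_format then (ext, url)
      else
        match fallback with
        | some p => pvAltLoop rest target_format (some p)
        | none => pvAltLoop rest target_format (some ((if ext = "" then target_format else ext), url))

def choose_format_url_alt (track : List (String × List (List (String × String)))) (target_format : String) : String × String :=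
  pvAltLoop (PySem.Dict.getD (PySem.Dict.mk track) "raw_formats" []) target_format none

-- ===== PRECONDITION & SPEC =====
-- Pre_ excludes exactly the inputs where A (and B) raise ValueError: no item of raw_formats has a non-empty stripped url.
def Pre_choose_format_url (track : List (String × List (List (String × String)))) (target_format : String) : Prop :=
  ∃ item ∈ PySem.Dict.getD (PySem.Dict.mk track) "raw_formats" [], pvField item "url" ≠ ""
instance (track : List (String × List (List (String × String)))) (target_format : String) : Decidable (Pre_choose_format_url track target_format) := by unfold Pre_choose_format_url; infer_instance

def pvWitness_choose_format_url : (List (String × List (List (String × String)))) × String :=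
  ([("raw_formats", [[("ext", "srt"), ("url", "http://u")]])], "srt")

def Spec_choose_format_url (track : List (String × List (List (String × String)))) (target_format : String) (out : String × String) : Prop := out = choose_format_url_alt track target_format
instance (track : List (String × List (List (String × String)))) (target_format : String) (out : String × String) : Decidable (Spec_choose_format_url track target_format out) := by unfold Spec_choose_format_url; infer_instance

-- ===== CLAIM (what is proved, stated in full; the proofs are below) =====
def Claim_equal_choose_format_url : Prop := ∀ (track : List (String × List (List (String × String)))) (target_format : String), Dom_choose_format_url track target_format → Pre_choose_format_url track target_format → Spec_choose_format_url track target_format (choose_format_url track target_format)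

-- ===== LEMMAS AND PROOFS =====

theorem pvAltLoop_some (raw : List (List (String × String))) (t : String) (q : String × String) :
    pvAltLoop raw t (some q) = (pvFindExact raw t).getD q := by
  induction raw with
  | nil => rfl
  | cons item rest ih =>
      simp only [pvAltLoop, pvFindExact]
      by_cases hu : pvField item "url" = ""
      · simp [hu, ih]
      · by_cases he : pvField item "ext" = t
        · simp [hu, he]
        · simp [hu, he, ih]

theorem pvAltLoop_none (raw : List (List (String × String))) (t : String) :
    pvAltLoop raw t none =
      match pvFindExact raw t with
      | some p => p
      | none =>
          match pvFindAny raw t with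
          | some p => p
          | none => ("", "") := by
  induction raw with
  | nil => rfl
  | cons item rest ih =>
      simp only [pvAltLoop, pvFindExact, pvFindAny]
      by_cases hu : pvField item "url" = ""
      · simp [hu, ih]
      · by_cases he : pvField item "ext" = t
        · simp [hu, he]
        · simp [hu, he, pvAltLoop_some]
          cases h : pvFindExact rest t <;> simp

-- ===== VERDICT (by name: the statement is the Claim_ definition above) =====
theorem choose_format_url_spec : Claim_equal_choose_format_url := by
  intro track target_format _ _
  show choose_format_url track target_format = choose_format_url_alt track target_format
  simp only [choose_format_url, choose_format_url_alt, pvAltLoop_none]
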